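-- pv_equiv track=rewrite | github.com/hlubenow/yetanother_raycaster.py | pygame/mazegenerator.py | getConclusionLine
-- ===== SOURCE A (Python) =====
-- def getConclusionLine(line, symbol):
--     x = line.index(symbol)
--     c = []
--     for i in range(len(line)):
--         if i in (x - 1, x, x + 1):
--             c.append("1")
--         else:
--             c.append("0")
--     return c
-- ===== SOURCE B (Python) =====
-- def getConclusionLine(line, symbol):
--     x = line.index(symbol)
--     c = ["0"] * len(line)
--     for p in (x - 1, x, x + 1):
--         if 0 <= p < len(line):
--             c[p] = "1"
--     return c
-- ===== Notes on version B (the rewrite author's own statement) =====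
-- stated objective: simpler
-- what changed: Instead of scanning every index and testing membership in (x-1, x, x+1), B preallocates a zero list and scatters at most three '1' marks at the guarded positions x-1, x, x+1.
import Mathlib
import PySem

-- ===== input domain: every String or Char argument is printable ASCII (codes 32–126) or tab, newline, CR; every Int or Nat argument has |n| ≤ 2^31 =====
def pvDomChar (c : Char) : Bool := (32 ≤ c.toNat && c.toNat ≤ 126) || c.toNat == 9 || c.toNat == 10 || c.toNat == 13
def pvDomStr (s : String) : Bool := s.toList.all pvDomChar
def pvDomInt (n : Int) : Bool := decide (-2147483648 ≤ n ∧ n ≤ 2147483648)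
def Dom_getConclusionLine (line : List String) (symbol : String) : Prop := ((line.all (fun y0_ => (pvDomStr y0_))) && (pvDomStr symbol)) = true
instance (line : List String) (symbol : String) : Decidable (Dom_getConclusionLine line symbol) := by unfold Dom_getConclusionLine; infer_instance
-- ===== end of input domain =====

-- B scatters at most three guarded '1' marks onto a preallocated zero list instead of
-- scanning every index and testing membership in (x-1, x, x+1); objective: simpler.


-- ===== PORT A =====
-- x = line.index(symbol); for i in range(len(line)): append "1" if i in (x-1,x,x+1) else "0"
def getConclusionLine (line : List String) (symbol : String) : List String :=
  match PySem.List.index? line symbol with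
  | none => []   -- Python raises ValueError; excluded by Pre_
  | some x =>
      (PySem.List.pyRange 0 (PySem.List.len line) 1).foldl
        (fun c i => c ++ [if i = (x : Int) - 1 ∨ i = (x : Int) ∨ i = (x : Int) + 1 then "1" else "0"]) []

-- ===== PORT B =====
-- x = line.index(symbol); c = ["0"]*len(line); for p in (x-1,x,x+1): if 0 <= p < len(line): c[p] = "1"
def getConclusionLine_alt (line : List String) (symbol : String) : List String :=
  match PySem.List.index? line symbol with
  | none => []   -- Python raises ValueError; excluded by Pre_
  | some x =>
      [(x : Int) - 1, (x : Int), (x : Int) + 1].foldl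
        (fun c p => if 0 ≤ p ∧ p < PySem.List.len line then PySem.List.pySetD c p "1" else c)
        (List.replicate line.length "0")

-- ===== PRECONDITION & SPEC =====
-- Pre_ excludes exactly the inputs where line.index(symbol) raises ValueError (symbol not in line).
def Pre_getConclusionLine (line : List String) (symbol : String) : Prop := symbol ∈ line
instance (line : List String) (symbol : String) : Decidable (Pre_getConclusionLine line symbol) := by unfold Pre_getConclusionLine; infer_instance
def pvWitness_getConclusionLine : List String × String := (["a", "b", "c"], "b")

def Spec_getConclusionLine (line : List String) (symbol : String) (out : List String) : Prop := out = getConclusionLine_alt line symbol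
instance (line : List String) (symbol : String) (out : List String) : Decidable (Spec_getConclusionLine line symbol out) := by unfold Spec_getConclusionLine; infer_instance

-- ===== CLAIM (what is proved, stated in full; the proofs are below) =====
def Claim_equal_getConclusionLine : Prop := ∀ (line : List String) (symbol : String), Dom_getConclusionLine line symbol → Pre_getConclusionLine line symbol → Spec_getConclusionLine line symbol (getConclusionLine line symbol)

-- ===== LEMMAS AND PROOFS =====

-- length of one guarded scatter step of B
theorem pvStepLen (L : List String) (c : List String) (p : Int) (hc : c.length = L.length) :
    (if 0 ≤ p ∧ p < PySem.List.len L then PySem.List.pySetD c p "1" else c).length = L.length := by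
  split_ifs with h
  · simp only [PySem.List.pySetD_of_nonneg, h.1, List.length_set]
    exact hc
  · exact hc

-- element read after one guarded scatter step of B
theorem pvStepGetD (L : List String) (c : List String) (p : Int) (k : Nat)
    (hc : c.length = L.length) (hk : k < L.length) :
    (if 0 ≤ p ∧ p < PySem.List.len L then PySem.List.pySetD c p "1" else c).getD k "0" =
      if (k : Int) = p then "1" else c.getD k "0" := by
  split_ifs with h h2 h2
  · simp only [PySem.List.len_eq] at h
    simp only [PySem.List.pySetD_of_nonneg, h.1]
    rw [List.getD_eq_getElem _ "0" (by simp only [List.length_set]; omega),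
      List.getElem_set, if_pos (by omega)]
  · simp only [PySem.List.len_eq] at h
    simp only [PySem.List.pySetD_of_nonneg, h.1]
    rw [List.getD_eq_getElem _ "0" (by simp only [List.length_set]; omega),
      List.getElem_set, if_neg (by omega),
      List.getD_eq_getElem _ "0" (by omega)]
  · simp only [PySem.List.len_eq] at h
    exact absurd h (by omega)
  · rfl

theorem getConclusionLine_spec : Claim_equal_getConclusionLine := by
  intro line symbol _ hmem
  unfold Spec_getConclusionLine
  rcases hidx : PySem.List.index? line symbol with _ | x
  · rw [PySem.List.index?_eq_none_iff] at hidx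
    exact absurd hmem hidx
  obtain ⟨hxlt, -, -⟩ := PySem.List.getElem_of_index?_eq_some hidx
  have hl : PySem.List.len line = (line.length : Int) := by simp
  simp only [getConclusionLine, getConclusionLine_alt, hidx,
    PySem.List.pyRange_one, PySem.List.foldl_append_singleton_eq_map, List.nil_append,
    List.foldl_cons, List.foldl_nil]
  have h0 : (List.replicate line.length "0").length = line.length := List.length_replicate
  apply List.ext_getElem
  · simp only [List.length_map, List.length_range]
    rw [pvStepLen line _ _ (pvStepLen line _ _ (pvStepLen line _ _ h0)), hl]
    omega
  · intro k h1 h2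
    simp only [List.length_map, List.length_range, hl] at h1
    have hk : k < line.length := by omega
    rw [List.getElem_map, List.getElem_map, List.getElem_range, ← List.getD_eq_getElem _ "0" h2,
      pvStepGetD line _ _ k (pvStepLen line _ _ (pvStepLen line _ _ h0)) hk,
      pvStepGetD line _ _ k (pvStepLen line _ _ h0) hk,
      pvStepGetD line _ _ k h0 hk,
      List.getD_eq_getElem _ "0" (by omega), List.getElem_replicate]
    split_ifs <;> first | rfl | omega
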